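-- pv_equiv track=rewrite | github.com/etherbeing/cveforge | core/compression/delta.py | flat_encoding
-- ===== SOURCE A (Python) =====
-- def bits_to_number(array: list[int] | str):
--     return sum(map(lambda x: int(x[1]) * 2 ** x[0], enumerate(reversed(array))))
--
-- def flat_encoding(array: list[int]):
--     flatted_array: list[list[int]] = []
--     for element in array:
--         if len(flatted_array):
--             target = flatted_array[-1]
--             if target[0] == element:
--                 target.append(0)
--             elif element - sum(target) == 1:
--                 target.append(1)
--             else:
--                 flatted_array.append([element])
--         else:
--             flatted_array.append([element])
--     for arr in flatted_array:
--         if len(arr) > 1: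
--             arr[1] = bits_to_number([1, *arr[1:]])
--             if len(arr) > 2:
--                 del arr[2:]
--         else:
--             arr.append(0)
--     return flatted_array
-- ===== SOURCE B (Python) =====
-- def flat_encoding(array):
--     out = []
--     running_sum = 0
--     for element in array:
--         if out and out[-1][0] == element:
--             f, v = out[-1]
--             out[-1] = (f, (v or 1) * 2)
--         elif out and element - running_sum == 1:
--             f, v = out[-1]
--             out[-1] = (f, (v or 1) * 2 + 1)
--             running_sum += 1
--         else:
--             out.append((element, 0))
--             running_sum = element
--     return [[f, v] for f, v in out]
-- ===== Notes on version B (the rewrite author's own statement) =====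
-- stated objective: alternative
-- what changed: B builds the final [first, value] pairs directly in one pass, keeping a running sum and folding each new bit into the value arithmetically, instead of A's growing per-group bit lists re-summed on every element plus a second bits_to_number pass.
import Mathlib
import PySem

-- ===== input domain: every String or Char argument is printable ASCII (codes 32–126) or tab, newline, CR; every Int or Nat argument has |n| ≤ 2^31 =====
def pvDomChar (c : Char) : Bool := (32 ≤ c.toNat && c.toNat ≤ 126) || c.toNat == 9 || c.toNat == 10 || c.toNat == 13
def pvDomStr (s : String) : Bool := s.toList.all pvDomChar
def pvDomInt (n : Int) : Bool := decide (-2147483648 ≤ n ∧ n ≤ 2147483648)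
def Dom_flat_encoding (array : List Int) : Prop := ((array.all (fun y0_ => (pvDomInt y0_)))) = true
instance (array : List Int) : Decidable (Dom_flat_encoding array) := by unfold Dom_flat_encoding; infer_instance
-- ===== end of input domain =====

-- B builds the final [first, value] pairs directly in one pass, keeping a scalar running sum
-- and folding each new bit into the value arithmetically (objective: alternative decomposition).

-- ===== PORT A =====
def bits_to_number (array : List Int) : Int :=
  (array.reverse.zipIdx.map (fun x => x.1 * 2 ^ x.2)).sum

def aStep (flatted : List (List Int)) (element : Int) : List (List Int) :=
  match flatted.getLast? with
  | some target =>
      if target.headI = element then flatted.dropLast ++ [target ++ [0]]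
      else if element - target.sum = 1 then flatted.dropLast ++ [target ++ [1]]
      else flatted ++ [[element]]
  | none => flatted ++ [[element]]

def aFinish (arr : List Int) : List Int :=
  if arr.length > 1 then
    let arr' := arr.set 1 (bits_to_number (1 :: arr.drop 1))
    if arr'.length > 2 then arr'.take 2 else arr'
  else arr ++ [0]

def flat_encoding (array : List Int) : List (List Int) :=
  (array.foldl aStep []).map aFinish

-- ===== PORT B =====
def orOne (v : Int) : Int := if v = 0 then 1 else v   -- Python's `v or 1` on an int

def bStep (st : List (Int × Int) × Int) (element : Int) : List (Int × Int) × Int :=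
  match st.1.getLast? with
  | some (f, v) =>
      if f = element then (st.1.dropLast ++ [(f, orOne v * 2)], st.2)
      else if element - st.2 = 1 then (st.1.dropLast ++ [(f, orOne v * 2 + 1)], st.2 + 1)
      else (st.1 ++ [(element, 0)], element)
  | none => (st.1 ++ [(element, 0)], element)

def flat_encoding_alt (array : List Int) : List (List Int) :=
  ((array.foldl bStep ([], 0)).1).map (fun p => [p.1, p.2])

-- ===== PRECONDITION & SPEC =====
def Spec_flat_encoding (array : List Int) (out : List (List Int)) : Prop := out = flat_encoding_alt array
instance (array : List Int) (out : List (List Int)) : Decidable (Spec_flat_encoding array out) := by unfold Spec_flat_encoding; infer_instance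

-- ===== CLAIM (what is proved, stated in full; the proofs are below) =====
def Claim_equal_flat_encoding : Prop := ∀ (array : List Int), Dom_flat_encoding array → Spec_flat_encoding array (flat_encoding array)

-- ===== LEMMAS AND PROOFS =====

def encTail (bits : List Int) : Int := if bits = [] then 0 else bits_to_number (1 :: bits)

def groupPair (g : List Int) : Int × Int := (g.headI, encTail g.tail)

def GoodGroup (g : List Int) : Prop := g ≠ [] ∧ ∀ b ∈ g.tail, b = 0 ∨ b = 1

def StInv (f : List (List Int)) (st : List (Int × Int) × Int) : Prop :=
  (∀ g ∈ f, GoodGroup g) ∧ st.1 = f.map groupPair ∧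
  (∀ g, f.getLast? = some g → st.2 = g.sum)

theorem sum_zipIdx_succ (l : List Int) (n : Nat) :
    ((l.zipIdx (n+1)).map (fun x => x.1 * 2 ^ x.2)).sum
      = 2 * ((l.zipIdx n).map (fun x => x.1 * 2 ^ x.2)).sum := by
  induction l generalizing n with
  | nil => simp
  | cons a l ih => simp [List.zipIdx_cons, ih (n+1), pow_succ]; ring

theorem btn_concat (xs : List Int) (b : Int) :
    bits_to_number (xs ++ [b]) = 2 * bits_to_number xs + b := by
  simp [bits_to_number, List.zipIdx_cons, sum_zipIdx_succ]; ring

theorem btn_one_cons_pos (tl : List Int) (h : ∀ b ∈ tl, 0 ≤ b) :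
    0 < bits_to_number (1 :: tl) := by
  induction tl using List.reverseRecOn with
  | nil => simp [bits_to_number]
  | append_singleton tl b ih =>
      have hb : (0:Int) ≤ b := h b (by simp)
      have := ih (fun x hx => h x (by simp [hx]))
      have : bits_to_number ((1 :: tl) ++ [b]) = 2 * bits_to_number (1 :: tl) + b :=
        btn_concat _ _
      simp only [List.cons_append] at this ⊢
      omega

theorem encTail_concat (tl : List Int) (b : Int) (h : ∀ x ∈ tl, 0 ≤ x) :
    encTail (tl ++ [b]) = orOne (encTail tl) * 2 + b := by
  cases tl with
  | nil =>
      simp [encTail, orOne, bits_to_number, List.zipIdx_cons]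
      ring
  | cons y tl' =>
      have hpos := btn_one_cons_pos (y :: tl') h
      have hc : bits_to_number ((1 :: y :: tl') ++ [b])
          = 2 * bits_to_number (1 :: y :: tl') + b := btn_concat _ _
      simp only [List.cons_append] at hc
      simp [encTail, orOne, hc, hpos.ne']
      ring

theorem headI_concat (g : List Int) (hne : g ≠ []) (b : Int) : (g ++ [b]).headI = g.headI := by
  cases g with | nil => exact absurd rfl hne | cons a t => simp

theorem tail_concat (g : List Int) (hne : g ≠ []) (b : Int) : (g ++ [b]).tail = g.tail ++ [b] := by
  cases g with | nil => exact absurd rfl hne | cons a t => simp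

theorem stinv_ext (f' : List (List Int)) (g : List Int) (hne : g ≠ [])
    (hbits : ∀ x ∈ g.tail, x = 0 ∨ x = 1) (hg : ∀ x ∈ f' ++ [g], GoodGroup x)
    (b : Int) (hb : b = 0 ∨ b = 1) :
    StInv (f' ++ [g ++ [b]])
      (f'.map groupPair ++ [(g.headI, orOne (encTail g.tail) * 2 + b)], g.sum + b) := by
  have hbits0 : ∀ x ∈ g.tail, (0:Int) ≤ x := fun x hx => by
    rcases hbits x hx with h | h <;> omega
  refine ⟨?_, ?_, ?_⟩
  · intro g' hg'
    rcases List.mem_append.mp hg' with h | h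
    · exact hg g' (List.mem_append.mpr (Or.inl h))
    · simp only [List.mem_singleton] at h
      subst h
      refine ⟨by simp [hne], ?_⟩
      rw [tail_concat g hne]
      intro x hx
      rcases List.mem_append.mp hx with hx | hx
      · exact hbits x hx
      · simp only [List.mem_singleton] at hx; subst hx; exact hb
  · simp only [List.map_append, List.map_cons, List.map_nil]
    congr 2
    simp [groupPair, headI_concat g hne, tail_concat g hne, encTail_concat g.tail b hbits0]
  · intro g' hg'
    rw [List.getLast?_concat] at hg'
    injection hg' with hg'
    subst hg'
    simp

theorem inv_step (f : List (List Int)) (st : List (Int × Int) × Int) (e : Int)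
    (h : StInv f st) : StInv (aStep f e) (bStep st e) := by
  obtain ⟨hg, hout, hrs⟩ := h
  obtain ⟨out, rs⟩ := st
  cases hl : f.getLast? with
  | none =>
      have hf : f = [] := List.getLast?_eq_none_iff.mp hl
      subst hf
      simp at hout; subst hout
      simp [aStep, bStep, StInv, GoodGroup, groupPair, encTail]
  | some g =>
      obtain ⟨f', rfl⟩ := List.getLast?_eq_some_iff.mp hl
      have hrs' : rs = g.sum := hrs g hl
      subst hrs'
      obtain ⟨hne, hbits⟩ := hg g (by simp)
      have hout' : out = f'.map groupPair ++ [groupPair g] := by simpa using hout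
      subst hout'
      have hA : aStep (f' ++ [g]) e =
          (if g.headI = e then f' ++ [g ++ [0]]
           else if e - g.sum = 1 then f' ++ [g ++ [1]]
           else (f' ++ [g]) ++ [[e]]) := by
        simp [aStep, hl]
      have hB : bStep (f'.map groupPair ++ [groupPair g], g.sum) e =
          (if g.headI = e then (f'.map groupPair ++ [(g.headI, orOne (encTail g.tail) * 2)], g.sum)
           else if e - g.sum = 1 then
             (f'.map groupPair ++ [(g.headI, orOne (encTail g.tail) * 2 + 1)], g.sum + 1)
           else ((f'.map groupPair ++ [groupPair g]) ++ [(e, 0)], e)) := by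
        simp [bStep, groupPair]
      rw [hA, hB]
      by_cases h1 : g.headI = e
      · rw [if_pos h1, if_pos h1]
        have := stinv_ext f' g hne hbits hg 0 (Or.inl rfl)
        simpa using this
      · rw [if_neg h1, if_neg h1]
        by_cases h2 : e - g.sum = 1
        · rw [if_pos h2, if_pos h2]
          exact stinv_ext f' g hne hbits hg 1 (Or.inr rfl)
        · rw [if_neg h2, if_neg h2]
          refine ⟨?_, ?_, ?_⟩
          · intro g' hg'
            rcases List.mem_append.mp hg' with hg' | hg'
            · exact hg g' hg'
            · simp only [List.mem_singleton] at hg'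
              subst hg'
              exact ⟨by simp, by simp⟩
          · simp [groupPair, encTail]
          · intro g' hg'
            rw [List.getLast?_concat] at hg'
            injection hg' with hg'
            subst hg'
            simp

theorem inv_foldl (arr : List Int) (f : List (List Int)) (st : List (Int × Int) × Int)
    (h : StInv f st) : StInv (arr.foldl aStep f) (arr.foldl bStep st) := by
  induction arr generalizing f st with
  | nil => exact h
  | cons a arr ih => exact ih _ _ (inv_step f st a h)

theorem aFinish_eq (g : List Int) (hne : g ≠ []) :
    aFinish g = [(groupPair g).1, (groupPair g).2] := by
  cases g with
  | nil => exact absurd rfl hne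
  | cons x tl =>
      cases tl with
      | nil => simp [aFinish, groupPair, encTail]
      | cons y tl' =>
          cases tl' with
          | nil => simp [aFinish, groupPair, encTail]
          | cons z tl'' => simp [aFinish, groupPair, encTail]

-- ===== VERDICT (by name: the statement is the Claim_ definition above) =====
theorem flat_encoding_spec : Claim_equal_flat_encoding := by
  intro array _
  show flat_encoding array = flat_encoding_alt array
  have hinv : StInv (array.foldl aStep []) (array.foldl bStep ([], 0)) :=
    inv_foldl array [] ([], 0) ⟨by simp, by simp, by simp⟩
  obtain ⟨hg, hout, _⟩ := hinv
  unfold flat_encoding flat_encoding_alt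
  rw [hout, List.map_map]
  exact List.map_congr_left fun g hgm => aFinish_eq g (hg g hgm).1
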